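-- pv_equiv track=rewrite | github.com/CarloVarni/GoogleSheetsAndForms | tests/validateRequestMaker.py | createRefDictionary
-- ===== SOURCE A (Python) =====
-- def createRefDictionary(inputs, labels):
--     output = []
--
--     for el in inputs:
--         toAdd = {}
--         for i in range(0, len(labels)):
--             if labels[i] is None:
--                 continue
--             toAdd[labels[i]] = el[i]
--         output.append(toAdd)
--
--     return output
-- ===== SOURCE B (Python) =====
-- def createRefDictionary(inputs, labels):
--     # Column-major: extract each labelled column once, then merge columns into per-row dicts.
--     cols = [(lab, [el[i] for el in inputs])
--             for i, lab in enumerate(labels) if lab is not None]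
--     out = [{} for _ in inputs]
--     for lab, col in cols:
--         for d, v in zip(out, col):
--             d[lab] = v
--     return out
-- ===== Notes on version B (the rewrite author's own statement) =====
-- stated objective: alternative
-- what changed: Replaces A's row-major nested loop (per row, scan all labels and insert) with a column-major algorithm: it extracts each non-None labelled column of values once, then merges the columns into a preallocated list of per-row dicts via zip.
import Mathlib
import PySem

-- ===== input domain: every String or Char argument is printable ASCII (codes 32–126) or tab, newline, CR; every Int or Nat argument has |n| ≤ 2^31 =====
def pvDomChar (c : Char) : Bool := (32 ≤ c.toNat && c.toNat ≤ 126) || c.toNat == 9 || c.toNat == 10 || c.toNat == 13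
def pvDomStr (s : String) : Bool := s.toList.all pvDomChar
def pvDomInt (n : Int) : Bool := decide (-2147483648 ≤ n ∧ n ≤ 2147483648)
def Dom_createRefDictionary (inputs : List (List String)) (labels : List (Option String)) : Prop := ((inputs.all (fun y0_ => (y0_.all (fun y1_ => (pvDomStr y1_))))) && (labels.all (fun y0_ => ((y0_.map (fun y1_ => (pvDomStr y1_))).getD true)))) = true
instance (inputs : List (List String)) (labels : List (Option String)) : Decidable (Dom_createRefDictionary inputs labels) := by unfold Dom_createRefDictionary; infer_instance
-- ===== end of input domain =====

-- B is column-major instead of A's row-major nested loop: it extracts each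
-- non-None labelled column of values once, then merges the columns into
-- preallocated per-row dicts (alternative algorithm; no speed claim).

-- ===== PORT A =====
def createRefDictionary (inputs : List (List String)) (labels : List (Option String)) : List (List (String × String)) :=
  inputs.foldl (fun output el =>
    output ++ [((PySem.List.pyRange 0 (labels.length : Int) 1).foldl (fun toAdd i =>
        match PySem.List.pyGetD labels i none with
        | none => toAdd
        | some lab => toAdd.insert lab (PySem.List.pyGetD el i "")   -- el[i]: in range under Pre_
        ) PySem.Dict.empty).items]) []

-- ===== PORT B =====
def createRefDictionary_alt (inputs : List (List String)) (labels : List (Option String)) : List (List (String × String)) :=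
  let cols : List (String × List String) :=
    (PySem.List.enumerate labels 0).filterMap (fun p =>
      p.2.map (fun lab => (lab, inputs.map (fun el => PySem.List.pyGetD el p.1 ""))))  -- el[p.1]: in range under Pre_
  let out : List (PySem.Dict String String) := inputs.map (fun _ => PySem.Dict.empty)
  (cols.foldl (fun out c => List.zipWith (fun d v => d.insert c.1 v) out c.2) out).map PySem.Dict.items

-- ===== PRECONDITION & SPEC =====
-- Pre_ excludes exactly the inputs where A raises IndexError: a row shorter than
-- some index carrying a non-None label.
def Pre_createRefDictionary (inputs : List (List String)) (labels : List (Option String)) : Prop :=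
  ∀ el ∈ inputs, ∀ i ∈ List.range labels.length, labels.getD i none ≠ none → i < el.length
instance (inputs : List (List String)) (labels : List (Option String)) : Decidable (Pre_createRefDictionary inputs labels) := by unfold Pre_createRefDictionary; infer_instance

def pvWitness_createRefDictionary : List (List String) × List (Option String) :=
  ([["x", "y", "z"], ["u", "v", "w"]], [some "a", none, some "b"])

def Spec_createRefDictionary (inputs : List (List String)) (labels : List (Option String)) (out : List (List (String × String))) : Prop := out = createRefDictionary_alt inputs labels
instance (inputs : List (List String)) (labels : List (Option String)) (out : List (List (String × String))) : Decidable (Spec_createRefDictionary inputs labels out) := by unfold Spec_createRefDictionary; infer_instance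

-- ===== CLAIM (what is proved, stated in full; the proofs are below) =====
def Claim_equal_createRefDictionary : Prop := ∀ (inputs : List (List String)) (labels : List (Option String)), Dom_createRefDictionary inputs labels → Pre_createRefDictionary inputs labels → Spec_createRefDictionary inputs labels (createRefDictionary inputs labels)

-- ===== LEMMAS AND PROOFS =====

theorem foldl_filterMap' {α β γ : Type} (f : α → Option β) (g : γ → β → γ) :
    ∀ (l : List α) (init : γ),
      (l.filterMap f).foldl g init
        = l.foldl (fun acc x => match f x with | none => acc | some y => g acc y) init := by
  intro l
  induction l with
  | nil => intro init; rfl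
  | cons x xs ih =>
    intro init
    simp only [List.filterMap_cons, List.foldl_cons]
    cases f x <;> simp [ih]

theorem foldl_append_singleton {α β : Type} (g : α → β) :
    ∀ (l : List α) (acc : List β),
      l.foldl (fun out el => out ++ [g el]) acc = acc ++ l.map g := by
  intro l
  induction l with
  | nil => intro acc; simp
  | cons x xs ih => intro acc; simp [ih]

theorem zipWith_map_same {α β γ δ : Type} (f : α → β) (g : α → γ) (h : β → γ → δ) :
    ∀ (l : List α), List.zipWith h (l.map f) (l.map g) = l.map (fun x => h (f x) (g x)) := by
  intro l
  induction l with
  | nil => rfl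
  | cons x xs ih => simp [ih]

-- merging columns into per-row dicts equals folding the valid (index,label) pairs per row
theorem cols_fold_eq (inputs : List (List String)) :
    ∀ (valid : List (Int × String)) (f : List String → PySem.Dict String String),
      (valid.map (fun q => (q.2, inputs.map (fun el => PySem.List.pyGetD el q.1 "")))).foldl
          (fun out c => List.zipWith (fun d v => d.insert c.1 v) out c.2) (inputs.map f)
        = inputs.map (fun el =>
            valid.foldl (fun d q => d.insert q.2 (PySem.List.pyGetD el q.1 "")) (f el)) := by
  intro valid
  induction valid with
  | nil => intro f; simp
  | cons q qs ih =>
    intro f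
    simp only [List.map_cons, List.foldl_cons]
    rw [zipWith_map_same, ih]

theorem inner_eq (labels : List (Option String)) (el : List String) :
    (PySem.List.pyRange 0 (labels.length : Int) 1).foldl (fun toAdd i =>
        match PySem.List.pyGetD labels i none with
        | none => toAdd
        | some lab => toAdd.insert lab (PySem.List.pyGetD el i "")) PySem.Dict.empty
      = ((PySem.List.enumerate labels 0).filterMap
            (fun p => p.2.map (fun lab => (p.1, lab)))).foldl
          (fun d q => d.insert q.2 (PySem.List.pyGetD el q.1 "")) PySem.Dict.empty := by
  rw [foldl_filterMap']
  rw [PySem.List.enumerate_eq_map_pyRange (d := none), List.foldl_map]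
  congr 1
  funext d i
  cases PySem.List.pyGetD labels i none <;> simp

-- ===== VERDICT (by name: the statement is the Claim_ definition above) =====
theorem createRefDictionary_spec : Claim_equal_createRefDictionary := by
  intro inputs labels _ _
  unfold Spec_createRefDictionary createRefDictionary createRefDictionary_alt
  rw [foldl_append_singleton]
  simp only [List.nil_append]
  have hcols :
      (PySem.List.enumerate labels 0).filterMap (fun p =>
          p.2.map (fun lab => (lab, inputs.map (fun el => PySem.List.pyGetD el p.1 ""))))
        = ((PySem.List.enumerate labels 0).filterMap
            (fun p => p.2.map (fun lab => (p.1, lab)))).map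
            (fun q => (q.2, inputs.map (fun el => PySem.List.pyGetD el q.1 ""))) := by
    rw [List.map_filterMap]
    congr 1
    funext p
    cases p.2 <;> simp
  rw [hcols, cols_fold_eq, List.map_map]
  apply List.map_congr_left
  intro el _
  simp only [Function.comp]
  rw [inner_eq]
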